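-- pv_equiv track=rewrite | github.com/allrounder02/LimeScribe | core/tts_text.py | _split_long_segment
-- ===== SOURCE A (Python) =====
-- def _split_long_segment(segment: str, max_chars: int) -> list[str]:
--     words = segment.split()
--     if not words:
--         return []
--
--     parts: list[str] = []
--     current: list[str] = []
--     current_len = 0
--
--     for word in words:
--         if not current:
--             current = [word]
--             current_len = len(word)
--             continue
--         addition = len(word) + 1
--         if current_len + addition > max_chars:
--             part = " ".join(current).strip()
--             if part and part[-1] not in ".!?":
--                 part += "."
--             parts.append(part)
--             current = [word]
--             current_len = len(word)
--             continue
--         current.append(word)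
--         current_len += addition
--
--     if current:
--         part = " ".join(current).strip()
--         if part and part[-1] not in ".!?":
--             part += "."
--         parts.append(part)
--
--     return [part for part in parts if part]
-- ===== SOURCE B (Python) =====
-- def _split_long_segment(segment: str, max_chars: int) -> list[str]:
--     words = segment.split()
--     n = len(words)
--
--     # Pass 1: greedy packing — compute group boundaries over word indices.
--     groups: list[list[str]] = []
--     i = 0
--     while i < n:
--         length = len(words[i])
--         j = i + 1
--         while j < n and length + len(words[j]) + 1 <= max_chars:
--             length += len(words[j]) + 1
--             j += 1
--         groups.append(words[i:j])
--         i = j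
--
--     # Pass 2: format each group.
--     formatted: list[str] = []
--     for g in groups:
--         p = " ".join(g).strip()
--         if p and p[-1] not in ".!?":
--             p += "."
--         formatted.append(p)
--
--     return [p for p in formatted if p]
-- ===== Notes on version B (the rewrite author's own statement) =====
-- stated objective: alternative
-- what changed: A's single interleaved loop (accumulating parts, current and current_len together and flushing mid-loop) is replaced by two separate passes: an index-based greedy boundary scan that slices the word list into groups, followed by a formatting pass mapped over the groups and a final non-empty filter.
import Mathlib
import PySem

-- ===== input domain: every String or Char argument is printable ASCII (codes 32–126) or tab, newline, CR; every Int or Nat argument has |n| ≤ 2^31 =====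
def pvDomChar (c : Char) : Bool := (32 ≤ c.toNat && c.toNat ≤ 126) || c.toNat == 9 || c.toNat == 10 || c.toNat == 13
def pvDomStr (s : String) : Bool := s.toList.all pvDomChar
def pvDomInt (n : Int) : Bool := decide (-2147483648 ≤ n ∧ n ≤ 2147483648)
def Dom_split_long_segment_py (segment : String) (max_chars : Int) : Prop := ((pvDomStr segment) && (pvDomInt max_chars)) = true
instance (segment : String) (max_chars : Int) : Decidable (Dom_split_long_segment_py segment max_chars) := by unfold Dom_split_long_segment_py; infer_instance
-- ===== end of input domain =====

-- B replaces A's single interleaved accumulator loop by two separate passes — an index-based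
-- greedy boundary scan producing the word groups, then a formatting map over the groups
-- (objective: alternative decomposition, same asymptotic cost).

-- ===== PORT A =====

-- ' if part and part[-1] not in ".!?" '  (the membership test; part[-1] on "" would raise, guarded by 'part and')
def pvLastPunctA (part : String) : Bool :=
  match PySem.Str.pyGet? part (-1) with
  | some c => c == '.' || c == '!' || c == '?'
  | none => false

-- A's flush: part = " ".join(current).strip(); if part and part[-1] not in ".!?": part += "."
def pvFlushA (current : List String) : String :=
  let part := PySem.Str.strip (PySem.Str.join " " current)
  if !(part == "") && !(pvLastPunctA part) then part ++ "." else part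

-- one iteration of A's for-loop; state = (parts, current, current_len)
def pvStepA (max_chars : Int) (st : List String × List String × Int) (word : String) :
    List String × List String × Int :=
  match st with
  | (parts, current, current_len) =>
    if current = [] then (parts, [word], PySem.Str.len word)
    else
      let addition := PySem.Str.len word + 1
      if current_len + addition > max_chars then
        (parts ++ [pvFlushA current], [word], PySem.Str.len word)
      else (parts, current ++ [word], current_len + addition)

def split_long_segment_py (segment : String) (max_chars : Int) : List String :=
  let words := PySem.Str.split₀ segment
  if words = [] then []
  else
    let st := words.foldl (pvStepA max_chars) ([], [], 0)
    let parts := if st.2.1 ≠ [] then st.1 ++ [pvFlushA st.2.1] else st.1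
    parts.filter (fun p => !(p == ""))

-- ===== PORT B =====

-- B's pass-2 membership test, same as in Source B: p[-1] not in ".!?" guarded by 'p and'
def pvLastPunctB (p : String) : Bool :=
  match PySem.Str.pyGet? p (-1) with
  | some c => c == '.' || c == '!' || c == '?'
  | none => false

-- B's formatting of one group: p = " ".join(g).strip(); if p and p[-1] not in ".!?": p += "."
def pvFmtB (g : List String) : String :=
  let p := PySem.Str.strip (PySem.Str.join " " g)
  if !(p == "") && !(pvLastPunctB p) then p ++ "." else p

-- the inner while loop: advance j while the next word still fits.
-- fuel only makes the recursion structural; ws.length is always enough (j never exceeds ws.length).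
def pvFindEndB (ws : List String) (max_chars : Int) : Nat → Int → Nat → Nat
  | 0, _, j => j
  | fuel + 1, length, j =>
    if h : j < ws.length then
      if length + PySem.Str.len ws[j] + 1 ≤ max_chars then
        pvFindEndB ws max_chars fuel (length + PySem.Str.len ws[j] + 1) (j + 1)
      else j
    else j

-- the outer while loop: collect words[i:j] group by group.
-- fuel only makes the recursion structural; ws.length is enough (i advances by at least 1 per group).
def pvGroupsB (ws : List String) (max_chars : Int) : Nat → Nat → List (List String)
  | 0, _ => []
  | fuel + 1, i =>
    if h : i < ws.length then
      let j := pvFindEndB ws max_chars ws.length (PySem.Str.len ws[i]) (i + 1)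
      PySem.List.slice ws (some (i : Int)) (some (j : Int)) :: pvGroupsB ws max_chars fuel j
    else []

def split_long_segment_py_alt (segment : String) (max_chars : Int) : List String :=
  let words := PySem.Str.split₀ segment
  let groups := pvGroupsB words max_chars words.length 0
  let formatted := groups.foldl (fun acc g => acc ++ [pvFmtB g]) []
  formatted.filter (fun p => !(p == ""))

-- ===== PRECONDITION & SPEC =====
def Spec_split_long_segment_py (segment : String) (max_chars : Int) (out : List String) : Prop := out = split_long_segment_py_alt segment max_chars
instance (segment : String) (max_chars : Int) (out : List String) : Decidable (Spec_split_long_segment_py segment max_chars out) := by unfold Spec_split_long_segment_py; infer_instance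

-- ===== CLAIM (what is proved, stated in full; the proofs are below) =====
def Claim_equal_split_long_segment_py : Prop := ∀ (segment : String) (max_chars : Int), Dom_split_long_segment_py segment max_chars → Spec_split_long_segment_py segment max_chars (split_long_segment_py segment max_chars)

-- ===== LEMMAS AND PROOFS =====

-- common reference: split greedily into chunks, recursively on the word list
def pvSpan (max_chars length : Int) : List String → List String × List String
  | [] => ([], [])
  | w :: ws =>
    if length + PySem.Str.len w + 1 ≤ max_chars then
      let p := pvSpan max_chars (length + PySem.Str.len w + 1) ws
      (w :: p.1, p.2)
    else ([], w :: ws)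

theorem pvSpan_append (max_chars length : Int) (ws : List String) :
    (pvSpan max_chars length ws).1 ++ (pvSpan max_chars length ws).2 = ws := by
  fun_induction pvSpan with
  | case1 => rfl
  | case2 _ w ws h p ih => simpa [p] using ih
  | case3 _ w ws h => simp

theorem pvSpan_snd_le (max_chars length : Int) (ws : List String) :
    (pvSpan max_chars length ws).2.length ≤ ws.length := by
  conv_rhs => rw [← pvSpan_append max_chars length ws]
  simp

def pvChunks (max_chars : Int) : List String → List (List String)
  | [] => []
  | w :: ws =>
    let p := pvSpan max_chars (PySem.Str.len w) ws
    (w :: p.1) :: pvChunks max_chars p.2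
termination_by ws => ws.length
decreasing_by
  have := pvSpan_snd_le max_chars (PySem.Str.len w) ws
  simp [PySem.Str.len] at this ⊢
  omega

-- B's inner while loop lands exactly where pvSpan stops (any sufficient fuel)
theorem pvFindEndB_eq_span (ws : List String) (max_chars : Int) :
    ∀ (fuel j : Nat) (length : Int), ws.length ≤ fuel + j →
      pvFindEndB ws max_chars fuel length j
        = j + (pvSpan max_chars length (ws.drop j)).1.length := by
  intro fuel
  induction fuel with
  | zero =>
    intro j length hle
    rw [List.drop_of_length_le (by omega)]
    simp [pvFindEndB, pvSpan]
  | succ fuel ih =>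
    intro j length hle
    by_cases h : j < ws.length
    · rw [List.drop_eq_getElem_cons h]
      by_cases hfit : length + PySem.Str.len ws[j] + 1 ≤ max_chars
      · simp only [pvFindEndB, dif_pos h, if_pos hfit, pvSpan, List.length_cons]
        rw [ih (j + 1) (length + PySem.Str.len ws[j] + 1) (by omega)]
        omega
      · simp only [pvFindEndB, dif_pos h, if_neg hfit, pvSpan, List.length_nil]
        omega
    · rw [List.drop_of_length_le (by omega)]
      simp [pvFindEndB, pvSpan, h]

-- B's outer while loop from index i computes the chunks of the remaining words
theorem pvGroupsB_eq_chunks (ws : List String) (max_chars : Int) :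
    ∀ (fuel i : Nat), ws.length ≤ fuel + i →
      pvGroupsB ws max_chars fuel i = pvChunks max_chars (ws.drop i) := by
  intro fuel
  induction fuel with
  | zero =>
    intro i hle
    rw [List.drop_of_length_le (by omega)]
    simp [pvGroupsB, pvChunks]
  | succ fuel ih =>
    intro i hle
    by_cases h : i < ws.length
    · simp only [pvGroupsB, dif_pos h]
      have hj : pvFindEndB ws max_chars ws.length (PySem.Str.len ws[i]) (i + 1)
          = (i + 1) + (pvSpan max_chars (PySem.Str.len ws[i]) (ws.drop (i + 1))).1.length :=
        pvFindEndB_eq_span ws max_chars ws.length (i + 1) (PySem.Str.len ws[i]) (by omega)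
      set j := pvFindEndB ws max_chars ws.length (PySem.Str.len ws[i]) (i + 1) with hjdef
      rw [List.drop_eq_getElem_cons h]
      show PySem.List.slice ws (some (i : Int)) (some (j : Int)) :: pvGroupsB ws max_chars fuel j
          = pvChunks max_chars (ws[i] :: ws.drop (i + 1))
      rw [pvChunks, ih j (by omega)]
      have happ := pvSpan_append max_chars (PySem.Str.len ws[i]) (ws.drop (i + 1))
      set p := pvSpan max_chars (PySem.Str.len ws[i]) (ws.drop (i + 1)) with hp
      have hdrop : List.drop j ws = p.2 := by
        have h1 : List.drop p.1.length (List.drop (i + 1) ws) = List.drop j ws := by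
          rw [List.drop_drop]; congr 1; omega
        rw [← h1, ← happ, List.drop_left]
      have hslice : PySem.List.slice ws (some (i : Int)) (some (j : Int)) = ws[i] :: p.1 := by
        rw [PySem.List.slice_natCast, List.drop_eq_getElem_cons h,
            show j - i = p.1.length + 1 from by omega,
            List.take_succ_cons, ← happ, List.take_left]
      rw [hslice, hdrop]
    · rw [List.drop_of_length_le (by omega)]
      simp [pvGroupsB, pvChunks, h]

-- A's loop + final flush, started on a non-empty current group, formats the chunks
theorem pvFoldA_eq (max_chars : Int) (ws : List String) :
    ∀ (parts cur : List String) (curlen : Int), cur ≠ [] →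
      (if (ws.foldl (pvStepA max_chars) (parts, cur, curlen)).2.1 ≠ [] then
        (ws.foldl (pvStepA max_chars) (parts, cur, curlen)).1
          ++ [pvFlushA (ws.foldl (pvStepA max_chars) (parts, cur, curlen)).2.1]
       else (ws.foldl (pvStepA max_chars) (parts, cur, curlen)).1)
      = parts ++ (((cur ++ (pvSpan max_chars curlen ws).1) ::
          pvChunks max_chars (pvSpan max_chars curlen ws).2).map pvFlushA) := by
  induction ws with
  | nil =>
    intro parts cur curlen hcur
    simp only [List.foldl_nil, pvSpan, pvChunks, List.map_cons, List.map_nil]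
    rw [if_pos hcur]
    simp
  | cons w ws ih =>
    intro parts cur curlen hcur
    simp only [List.foldl_cons, pvStepA]
    rw [if_neg hcur]
    by_cases hb : curlen + (PySem.Str.len w + 1) > max_chars
    · rw [if_pos hb]
      have hg : ¬(curlen + PySem.Str.len w + 1 ≤ max_chars) := by omega
      simp only [pvSpan, if_neg hg]
      rw [ih (parts ++ [pvFlushA cur]) [w] (PySem.Str.len w) (by simp)]
      simp only [pvChunks]
      simp
    · rw [if_neg hb]
      have hg : curlen + PySem.Str.len w + 1 ≤ max_chars := by omega
      simp only [pvSpan, if_pos hg]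
      rw [ih parts (cur ++ [w]) (curlen + (PySem.Str.len w + 1)) (by simp),
          show curlen + (PySem.Str.len w + 1) = curlen + PySem.Str.len w + 1 from by ring]
      simp

-- ===== VERDICT (by name: the statement is the Claim_ definition above) =====
theorem pvFmtB_eq_pvFlushA : pvFmtB = pvFlushA := rfl

theorem split_long_segment_py_spec : Claim_equal_split_long_segment_py := by
  intro segment max_chars _
  show split_long_segment_py segment max_chars = split_long_segment_py_alt segment max_chars
  simp only [split_long_segment_py, split_long_segment_py_alt]
  rw [PySem.List.foldl_append_singleton_eq_map,
      pvGroupsB_eq_chunks (PySem.Str.split₀ segment) max_chars (PySem.Str.split₀ segment).length 0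
        (by omega),
      List.drop_zero, pvFmtB_eq_pvFlushA]
  cases hw : PySem.Str.split₀ segment with
  | nil => simp [pvChunks]
  | cons w ws =>
    rw [if_neg (by simp)]
    have h1 : pvStepA max_chars ([], [], 0) w = ([], [w], PySem.Str.len w) := rfl
    rw [List.foldl_cons, h1, pvFoldA_eq max_chars ws [] [w] (PySem.Str.len w) (by simp)]
    simp only [pvChunks]
    simp
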